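-- pv_equiv track=rewrite | github.com/cody-scott/JJE_Automation | _team_combinations.py | _subcheck
-- ===== SOURCE A (Python) =====
-- import itertools
--
-- def _subcheck(i_item):
--     _ac = list(itertools.chain.from_iterable(i_item))
--     d = []
--     for i in _ac:
--         if i in d:
--             return False
--         d.append(i)
--     return True
-- ===== SOURCE B (Python) =====
-- import itertools
--
-- def _subcheck(i_item):
--     _ac = list(itertools.chain.from_iterable(i_item))
--     return len(_ac) == len(set(_ac))
-- ===== Notes on version B (the rewrite author's own statement) =====
-- stated objective: simpler
-- what changed: Replaces the per-element 'seen' list scan with early return by a single set-vs-list length comparison of the flattened data.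
import Mathlib
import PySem

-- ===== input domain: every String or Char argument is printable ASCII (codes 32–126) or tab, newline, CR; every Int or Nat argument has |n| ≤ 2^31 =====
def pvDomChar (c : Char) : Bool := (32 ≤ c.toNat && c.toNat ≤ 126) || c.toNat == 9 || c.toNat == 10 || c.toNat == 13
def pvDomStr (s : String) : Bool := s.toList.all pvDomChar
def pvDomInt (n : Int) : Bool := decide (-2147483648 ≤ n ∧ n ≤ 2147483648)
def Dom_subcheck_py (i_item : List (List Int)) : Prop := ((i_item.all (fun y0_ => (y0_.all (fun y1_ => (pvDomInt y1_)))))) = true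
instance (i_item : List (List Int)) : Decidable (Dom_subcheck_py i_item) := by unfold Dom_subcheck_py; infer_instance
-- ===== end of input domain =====

-- B replaces A's seen-list scan with early return by a single length comparison of the flattened list against its set; equivalence proved on all inputs.


-- ===== PORT A =====
-- the 'for i in _ac' loop with seen-list d and early 'return False'
def subcheckLoop (ac d : List Int) : Bool :=
  match ac with
  | [] => true
  | i :: rest => if i ∈ d then false else subcheckLoop rest (d ++ [i])

def subcheck_py (i_item : List (List Int)) : Bool :=
  subcheckLoop i_item.flatten []

-- ===== PORT B =====
def subcheck_py_alt (i_item : List (List Int)) : Bool :=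
  let ac := i_item.flatten
  decide (ac.length = (PySem.Set.ofList ac).length)

-- ===== PRECONDITION & SPEC =====
def Spec_subcheck_py (i_item : List (List Int)) (out : Bool) : Prop := out = subcheck_py_alt i_item
instance (i_item : List (List Int)) (out : Bool) : Decidable (Spec_subcheck_py i_item out) := by unfold Spec_subcheck_py; infer_instance

-- ===== CLAIM (what is proved, stated in full; the proofs are below) =====
def Claim_equal_subcheck_py : Prop := ∀ (i_item : List (List Int)), Dom_subcheck_py i_item → Spec_subcheck_py i_item (subcheck_py i_item)

-- ===== LEMMAS AND PROOFS =====

theorem subcheckLoop_eq (ac : List Int) : ∀ d : List Int, d.Nodup →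
    subcheckLoop ac d = decide ((d ++ ac).Nodup) := by
  induction ac with
  | nil => intro d hd; simp [subcheckLoop, hd]
  | cons i rest ih =>
    intro d hd
    by_cases h : i ∈ d
    · simp only [subcheckLoop, if_pos h, List.nodup_append]
      rw [eq_comm, decide_eq_false_iff_not]
      rintro ⟨-, -, hdisj⟩
      exact hdisj i h i (List.mem_cons_self) rfl
    · have hnd : (d ++ [i]).Nodup := by
        rw [List.nodup_append]
        refine ⟨hd, by simp, ?_⟩
        intro a ha b hb
        simp only [List.mem_singleton] at hb
        subst hb
        exact fun he => h (he ▸ ha)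
      have := ih (d ++ [i]) hnd
      simpa [subcheckLoop, h, List.append_assoc] using this

theorem length_ofList_eq_iff (xs : List Int) :
    ((PySem.Set.ofList xs).length = xs.length) ↔ xs.Nodup := by
  induction xs using List.reverseRecOn with
  | nil => simp
  | append_singleton ys x ih =>
    rw [PySem.Set.ofList_append_singleton, PySem.Set.add_eq_ite]
    by_cases h : x ∈ PySem.Set.ofList ys
    · have hx : x ∈ ys := (PySem.Set.mem_ofList ys x).1 h
      have hle := PySem.Set.length_ofList_le (xs := ys)
      rw [if_pos h]
      constructor
      · intro he; simp at he; omega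
      · intro hn
        rw [List.nodup_append] at hn
        exact absurd rfl (hn.2.2 x hx x (List.mem_singleton.2 rfl))
    · have hx : x ∉ ys := fun hm => h ((PySem.Set.mem_ofList ys x).2 hm)
      rw [if_neg h]
      simp only [List.length_append, List.length_singleton, List.nodup_append, Nat.add_right_cancel_iff, ih]
      constructor
      · intro hn
        refine ⟨hn, by simp, ?_⟩
        intro a ha b hb
        simp only [List.mem_singleton] at hb
        subst hb
        exact fun he => hx (he ▸ ha)
      · exact fun hn => hn.1

-- ===== VERDICT (by name: the statement is the Claim_ definition above) =====
theorem subcheck_py_spec : Claim_equal_subcheck_py := by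
  intro i_item _
  unfold Spec_subcheck_py subcheck_py subcheck_py_alt
  rw [subcheckLoop_eq _ [] List.nodup_nil, List.nil_append, decide_eq_decide]
  exact (eq_comm.trans (length_ofList_eq_iff _)).symm
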